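-- pv_equiv track=rewrite | github.com/MustafaAH10/verifiers | environments/countdown_numbers/countdown_numbers.py | solve_countdown
-- ===== SOURCE A (Python) =====
-- from itertools import permutations, product
-- from typing import Optional
--
-- def evaluate_rpn(tokens: list) -> Optional[int]:
--     """
--     Evaluate Reverse Polish Notation expression.
--     Returns None if invalid (division by zero, non-integer, negative).
--     """
--     stack = []
--     for token in tokens:
--         if isinstance(token, int):
--             stack.append(token)
--         else:
--             if len(stack) < 2:
--                 return None
--             b, a = stack.pop(), stack.pop()
--             if token == "+":
--                 result = a + b
--             elif token == "-":
--                 result = a - b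
--                 if result <= 0:
--                     return None
--             elif token == "*":
--                 result = a * b
--             elif token == "/":
--                 if b == 0 or a % b != 0:
--                     return None
--                 result = a // b
--             else:
--                 return None
--             stack.append(result)
--
--     return stack[0] if len(stack) == 1 else None
--
-- def rpn_to_infix(tokens: list) -> str:
--     """Convert RPN to infix notation string."""
--     stack = []
--     for token in tokens:
--         if isinstance(token, int):
--             stack.append(str(token))
--         else:
--             b, a = stack.pop(), stack.pop()
--             stack.append(f"({a} {token} {b})")
--     return stack[0] if stack else ""
--
-- def solve_countdown(
--     numbers: list[int], target: int, max_solutions: int = 1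
-- ) -> list[str]:
--     """
--     Find solutions using brute-force search over all combinations.
--     Returns list of solution strings in infix notation.
--     """
--     solutions = []
--     ops = ["+", "-", "*", "/"]
--
--     # Try all subsets of numbers (2 to 6 numbers)
--     for r in range(2, len(numbers) + 1):
--         for perm in permutations(numbers, r):
--             # Try all operator combinations
--             for op_combo in product(ops, repeat=r - 1):
--                 # Build RPN: n1 n2 op1 n3 op2 ... (left-to-right evaluation)
--                 rpn = [perm[0], perm[1], op_combo[0]]
--                 for i in range(2, r):
--                     rpn.extend([perm[i], op_combo[i - 1]])
--
--                 result = evaluate_rpn(rpn)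
--                 if result == target:
--                     infix = rpn_to_infix(rpn)
--                     if infix not in solutions:
--                         solutions.append(infix)
--                         if len(solutions) >= max_solutions:
--                             return solutions
--
--     return solutions
-- ===== SOURCE B (Python) =====
-- from itertools import permutations
--
--
-- def _step(a, op, b):
--     """Apply one left-associative step; None = invalid (Countdown rules)."""
--     if op == "+":
--         return a + b
--     if op == "-":
--         r = a - b
--         return r if r > 0 else None
--     if op == "*":
--         return a * b
--     if b != 0 and a % b == 0:
--         return a // b
--     return None
--
--
-- def _extend(rest, val, expr, target, max_solutions, solutions):
--     """DFS over operator choices; prunes a whole operator subtree as soon as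
--     one step is invalid. Returns True once max_solutions is reached."""
--     if not rest:
--         if val == target and expr not in solutions:
--             solutions.append(expr)
--             if len(solutions) >= max_solutions:
--                 return True
--         return False
--     b, tail = rest[0], list(rest[1:])
--     for op in ["+", "-", "*", "/"]:
--         nv = _step(val, op, b)
--         if nv is not None and _extend(tail, nv, f"({expr} {op} {b})", target, max_solutions, solutions):
--             return True
--     return False
--
--
-- def solve_countdown(numbers: list, target: int, max_solutions: int = 1) -> list:
--     solutions = []
--     for r in range(2, len(numbers) + 1):
--         for perm in permutations(numbers, r):
--             if _extend(list(perm[1:]), perm[0], str(perm[0]), target, max_solutions, solutions):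
--                 return solutions
--     return solutions
-- ===== Notes on version B (the rewrite author's own statement) =====
-- stated objective: alternative
-- what changed: Replaced A's per-combination RPN pipeline (build an RPN token list, evaluate it on a stack, then re-walk it to build the infix string) with a single DFS that folds the value and the infix string left-associatively along each permutation, pruning the whole operator subtree as soon as one step is invalid.
import Mathlib
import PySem

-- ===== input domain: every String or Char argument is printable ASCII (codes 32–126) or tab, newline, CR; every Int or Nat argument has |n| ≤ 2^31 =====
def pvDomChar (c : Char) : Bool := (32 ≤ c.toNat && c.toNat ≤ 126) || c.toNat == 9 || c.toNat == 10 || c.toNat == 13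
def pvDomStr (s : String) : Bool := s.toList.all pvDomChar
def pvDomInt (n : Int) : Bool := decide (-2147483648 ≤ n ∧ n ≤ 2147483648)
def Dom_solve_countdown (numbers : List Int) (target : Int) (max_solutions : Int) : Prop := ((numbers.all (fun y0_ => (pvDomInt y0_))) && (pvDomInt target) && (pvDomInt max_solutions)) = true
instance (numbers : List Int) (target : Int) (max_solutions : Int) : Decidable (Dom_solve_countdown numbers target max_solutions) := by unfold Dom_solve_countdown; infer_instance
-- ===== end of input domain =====

-- B replaces A's build-RPN / evaluate-RPN / RPN-to-infix pipeline by one pruned DFS that folds value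
-- and infix string along each permutation, skipping whole operator subtrees on an invalid step (objective: alternative).

-- shared loop encoding: a Python 'for' loop whose body may 'return' early (the Bool is the early-exit flag)
def foldStop {α σ : Type} (f : σ → α → σ × Bool) : σ → List α → σ × Bool
  | s, [] => (s, false)
  | s, a :: l =>
    match f s a with
    | (s', true) => (s', true)
    | (s', false) => foldStop f s' l

-- ===== PORT A =====
-- RPN token: a Python int or operator string
inductive Tok where
  | num : Int → Tok
  | op : String → Tok
deriving DecidableEq, Repr

-- evaluate_rpn: stack machine (Lean list head = Python stack top)
def evalGo : List Int → List Tok → Option Int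
  | stack, [] => match stack with | [v] => some v | _ => none  -- stack[0] if len(stack) == 1 else None
  | stack, Tok.num n :: ts => evalGo (n :: stack) ts
  | stack, Tok.op s :: ts =>
    match stack with
    | b :: a :: rest =>
      if s = "+" then evalGo ((a + b) :: rest) ts
      else if s = "-" then
        if a - b ≤ 0 then none else evalGo ((a - b) :: rest) ts
      else if s = "*" then evalGo ((a * b) :: rest) ts
      else if s = "/" then
        if b = 0 ∨ PySem.Int.mod a b ≠ 0 then none
        else evalGo (PySem.Int.floordiv a b :: rest) ts
      else none
    | _ => none  -- len(stack) < 2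

def evaluate_rpn (tokens : List Tok) : Option Int := evalGo [] tokens

-- rpn_to_infix (Python pops with no length check: IndexError is unreachable on the RPN lists A builds,
-- ported as a dummy "" on that unreachable branch)
def infixGo : List String → List Tok → String
  | stack, [] => (stack.getLast?).getD ""  -- stack[0] if stack else ""  (stack[0] is the bottom)
  | stack, Tok.num n :: ts => infixGo (PySem.Int.toStr n :: stack) ts
  | stack, Tok.op s :: ts =>
    match stack with
    | b :: a :: rest => infixGo (("(" ++ a ++ " " ++ s ++ " " ++ b ++ ")") :: rest) ts
    | _ => ""  -- unreachable (Python IndexError)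

def rpn_to_infix (tokens : List Tok) : String := infixGo [] tokens

-- itertools.product(["+","-","*","/"], repeat=k), in itertools order (first position varies slowest)
def pyProd : Nat → List (List String)
  | 0 => [[]]
  | k + 1 => (["+", "-", "*", "/"]).flatMap (fun o => (pyProd k).map (fun c => o :: c))

-- body of A's innermost loop: build the RPN list, evaluate, dedup-append, early-return test
def tryComboA (target max_solutions r : Int) (perm : List Int) (sols : List String)
    (combo : List String) : List String × Bool :=
  let rpn0 : List Tok := [Tok.num (PySem.List.pyGetD perm 0 0), Tok.num (PySem.List.pyGetD perm 1 0),
                          Tok.op (PySem.List.pyGetD combo 0 "")]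
  let rpn := (PySem.List.pyRange 2 r 1).foldl
      (fun acc i => acc ++ [Tok.num (PySem.List.pyGetD perm i 0), Tok.op (PySem.List.pyGetD combo (i - 1) "")]) rpn0
  if evaluate_rpn rpn = some target then
    let infixStr := rpn_to_infix rpn
    if infixStr ∈ sols then (sols, false)
    else
      let sols' := sols ++ [infixStr]
      (sols', decide ((sols'.length : Int) ≥ max_solutions))
  else (sols, false)

def solve_countdown (numbers : List Int) (target : Int) (max_solutions : Int) : List String :=
  (foldStop (fun sols r =>
      foldStop (fun sols perm =>
          foldStop (fun sols combo => tryComboA target max_solutions r perm sols combo)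
            sols (pyProd (r.toNat - 1)))
        sols (PySem.List.permutations numbers r.toNat))
    [] (PySem.List.pyRange 2 ((numbers.length : Int) + 1) 1)).1

-- ===== PORT B =====
-- _step: one left-associative step, none = invalid
def stepB (a : Int) (op : String) (b : Int) : Option Int :=
  if op = "+" then some (a + b)
  else if op = "-" then
    if a - b > 0 then some (a - b) else none
  else if op = "*" then some (a * b)
  else if b ≠ 0 ∧ PySem.Int.mod a b = 0 then some (PySem.Int.floordiv a b)
  else none

-- _extend: DFS over operator choices along the rest of the permutation
def extendB (target max_solutions : Int) : List Int → Int → String → List String → List String × Bool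
  | [], val, expr, sols =>
    if val = target ∧ expr ∉ sols then
      let sols' := sols ++ [expr]
      (sols', decide ((sols'.length : Int) ≥ max_solutions))
    else (sols, false)
  | b :: tail, val, expr, sols =>
    foldStop (fun s op =>
        match stepB val op b with
        | some nv => extendB target max_solutions tail nv
            ("(" ++ expr ++ " " ++ op ++ " " ++ PySem.Int.toStr b ++ ")") s
        | none => (s, false))
      sols ["+", "-", "*", "/"]

def solve_countdown_alt (numbers : List Int) (target : Int) (max_solutions : Int) : List String :=
  (foldStop (fun sols r =>
      foldStop (fun sols perm =>
          match perm with
          | p0 :: rest => extendB target max_solutions rest p0 (PySem.Int.toStr p0) sols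
          | [] => (sols, false)  -- unreachable: permutations of size r ≥ 2 are nonempty
        )
        sols (PySem.List.permutations numbers r.toNat))
    [] (PySem.List.pyRange 2 ((numbers.length : Int) + 1) 1)).1

-- ===== PRECONDITION & SPEC =====
def Spec_solve_countdown (numbers : List Int) (target : Int) (max_solutions : Int) (out : List String) : Prop := out = solve_countdown_alt numbers target max_solutions
instance (numbers : List Int) (target : Int) (max_solutions : Int) (out : List String) : Decidable (Spec_solve_countdown numbers target max_solutions out) := by unfold Spec_solve_countdown; infer_instance

-- ===== CLAIM (what is proved, stated in full; the proofs are below) =====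
def Claim_equal_solve_countdown : Prop := ∀ (numbers : List Int) (target : Int) (max_solutions : Int), Dom_solve_countdown numbers target max_solutions → Spec_solve_countdown numbers target max_solutions (solve_countdown numbers target max_solutions)

-- ===== LEMMAS AND PROOFS =====

-- tokens of the interleaved RPN tail: n2 op1 n3 op2 …, as (op, operand) pairs
def pairsToks (zs : List (String × Int)) : List Tok :=
  zs.flatMap (fun cb => [Tok.num cb.2, Tok.op cb.1])

-- direct left-associative evaluation with A's operator chain
def evalSteps (v : Int) : List (String × Int) → Option Int
  | [] => some v
  | (c, b) :: zs =>
    if c = "+" then evalSteps (v + b) zs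
    else if c = "-" then
      if v - b ≤ 0 then none else evalSteps (v - b) zs
    else if c = "*" then evalSteps (v * b) zs
    else if c = "/" then
      if b = 0 ∨ PySem.Int.mod v b ≠ 0 then none else evalSteps (PySem.Int.floordiv v b) zs
    else none

-- direct left-associative infix-string construction
def strSteps (s : String) : List (String × Int) → String
  | [] => s
  | (c, b) :: zs => strSteps ("(" ++ s ++ " " ++ c ++ " " ++ PySem.Int.toStr b ++ ")") zs

-- A's post-evaluation step, abstracted from tryComboA
def finishA (target max_solutions : Int) (sols : List String) (res : Option Int) (str : String) :
    List String × Bool :=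
  if res = some target then
    if str ∈ sols then (sols, false)
    else
      let sols' := sols ++ [str]
      (sols', decide ((sols'.length : Int) ≥ max_solutions))
  else (sols, false)

theorem foldStop_append {α σ : Type} (f : σ → α → σ × Bool) (s : σ) (l₁ l₂ : List α) :
    foldStop f s (l₁ ++ l₂) =
      match foldStop f s l₁ with
      | (s', true) => (s', true)
      | (s', false) => foldStop f s' l₂ := by
  induction l₁ generalizing s with
  | nil => simp [foldStop]
  | cons a l ih =>
    simp only [List.cons_append, foldStop]
    rcases f s a with ⟨s', d⟩
    cases d <;> simp [ih]

theorem foldStop_flatMap {α β σ : Type} (f : σ → β → σ × Bool) (g : α → List β) (s : σ)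
    (l : List α) :
    foldStop f s (l.flatMap g) = foldStop (fun s x => foldStop f s (g x)) s l := by
  induction l generalizing s with
  | nil => simp [foldStop]
  | cons a l ih =>
    simp only [List.flatMap_cons, foldStop_append, foldStop]
    rcases foldStop f s (g a) with ⟨s', d⟩
    cases d <;> simp [ih]

theorem foldStop_map {α β σ : Type} (f : σ → β → σ × Bool) (g : α → β) (s : σ) (l : List α) :
    foldStop f s (l.map g) = foldStop (fun s x => f s (g x)) s l := by
  induction l generalizing s with
  | nil => rfl
  | cons a l ih =>
    simp only [List.map_cons, foldStop]
    rcases f s (g a) with ⟨s', d⟩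
    cases d <;> simp [ih]

theorem foldStop_congr {α σ : Type} {f g : σ → α → σ × Bool} {l : List α} (s : σ)
    (h : ∀ s a, a ∈ l → f s a = g s a) : foldStop f s l = foldStop g s l := by
  induction l generalizing s with
  | nil => rfl
  | cons a l ih =>
    simp only [foldStop, h s a (List.mem_cons_self ..)]
    rcases g s a with ⟨s', d⟩
    cases d <;> simp [ih _ fun s a ha => h s a (List.mem_cons_of_mem _ ha)]

theorem foldStop_none {α σ : Type} {f : σ → α → σ × Bool} {l : List α} (s : σ)
    (h : ∀ s a, a ∈ l → f s a = (s, false)) : foldStop f s l = (s, false) := by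
  induction l generalizing s with
  | nil => rfl
  | cons a l ih =>
    simp only [foldStop, h s a (List.mem_cons_self ..)]
    exact ih _ fun s a ha => h s a (List.mem_cons_of_mem _ ha)

theorem pyProd_length {k : Nat} {c : List String} (hc : c ∈ pyProd k) : c.length = k := by
  induction k generalizing c with
  | zero => simp [pyProd] at hc; simp [hc]
  | succ k ih =>
    simp only [pyProd, List.mem_flatMap, List.mem_map] at hc
    obtain ⟨o, -, c', hc', rfl⟩ := hc
    simp [ih hc']

theorem evalGo_pairs (zs : List (String × Int)) (v : Int) :
    evalGo [v] (pairsToks zs) = evalSteps v zs := by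
  induction zs generalizing v with
  | nil => rfl
  | cons cb zs ih =>
    rcases cb with ⟨c, b⟩
    simp only [pairsToks, List.flatMap_cons, List.cons_append, List.nil_append, evalGo, evalSteps]
    split_ifs with h1 h2 h3 h4
    · exact ih _
    · rfl
    · exact ih _
    · exact ih _
    · rfl
    · exact ih _
    · rfl

theorem infixGo_pairs (zs : List (String × Int)) (s : String) :
    infixGo [s] (pairsToks zs) = strSteps s zs := by
  induction zs generalizing s with
  | nil => rfl
  | cons cb zs ih =>
    rcases cb with ⟨c, b⟩
    simp only [pairsToks, List.flatMap_cons, List.cons_append, List.nil_append, infixGo, strSteps]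
    exact ih _

theorem rpn_build (ps : List Int) (cs : List String) (j : Nat) (perm : List Int)
    (combo : List String) (acc : List Tok) (hj : 1 ≤ j) (hp : perm.drop j = ps)
    (hc : combo.drop (j - 1) = cs) (hl : cs.length = ps.length) :
    (PySem.List.pyRange (j : Int) ((j : Int) + ps.length) 1).foldl
        (fun acc i => acc ++ [Tok.num (PySem.List.pyGetD perm i 0),
                              Tok.op (PySem.List.pyGetD combo (i - 1) "")]) acc =
      acc ++ pairsToks (cs.zip ps) := by
  induction ps generalizing cs j acc with
  | nil =>
    rw [List.length_eq_zero_iff.mp hl]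
    simp [PySem.List.pyRange_one_eq_nil, pairsToks]
  | cons p ps ih =>
    rcases cs with _ | ⟨c, cs⟩
    · simp at hl
    have hpj : perm[j]? = some p := by
      have h : (List.drop j perm)[0]? = perm[j + 0]? := List.getElem?_drop
      rw [hp] at h; simpa using h.symm
    have hcj : combo[j - 1]? = some c := by
      have h : (List.drop (j - 1) combo)[0]? = combo[(j - 1) + 0]? := List.getElem?_drop
      rw [hc] at h; simpa using h.symm
    have hcons : PySem.List.pyRange (j : Int) ((j : Int) + (p :: ps).length) 1 =
        (j : Int) :: PySem.List.pyRange ((j : Int) + 1) ((j : Int) + (p :: ps).length) 1 := by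
      apply PySem.List.pyRange_one_cons
      simp only [List.length_cons]
      push_cast
      omega
    rw [hcons]
    simp only [List.foldl_cons]
    have hgp : PySem.List.pyGetD perm (j : Int) 0 = p := by
      rw [PySem.List.pyGetD_natCast]
      simp [List.getD, hpj]
    have hgc : PySem.List.pyGetD combo ((j : Int) - 1) "" = c := by
      have : ((j : Int) - 1) = ((j - 1 : Nat) : Int) := by omega
      rw [this, PySem.List.pyGetD_natCast]
      simp [List.getD, hcj]
    rw [hgp, hgc]
    have hrange : ((j : Int) + 1) = ((j + 1 : Nat) : Int) := by push_cast; ring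
    have hlen : (j : Int) + (p :: ps).length = ((j + 1 : Nat) : Int) + ps.length := by
      simp only [List.length_cons]; push_cast; ring
    rw [hrange, hlen,
      ih cs (j + 1) (acc ++ [Tok.num p, Tok.op c]) (by omega)
        (by rw [← List.drop_drop, hp]; rfl)
        (by have : j + 1 - 1 = (j - 1) + 1 := by omega
            rw [this, ← List.drop_drop, hc]; rfl)
        (by simpa using hl)]
    simp [pairsToks]

theorem tryComboA_eq (target max_solutions : Int) (p0 p1 : Int) (ps : List Int)
    (combo : List String) (sols : List String) (hl : combo.length = ps.length + 1) :
    tryComboA target max_solutions ((p0 :: p1 :: ps).length : Int) (p0 :: p1 :: ps) sols combo =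
      finishA target max_solutions sols (evalSteps p0 (combo.zip (p1 :: ps)))
        (strSteps (PySem.Int.toStr p0) (combo.zip (p1 :: ps))) := by
  rcases combo with _ | ⟨c0, cs⟩
  · simp at hl
  have hcl : cs.length = ps.length := by simpa using hl
  have hrpn : (PySem.List.pyRange 2 (((p0 :: p1 :: ps).length : Nat) : Int) 1).foldl
      (fun acc i => acc ++ [Tok.num (PySem.List.pyGetD (p0 :: p1 :: ps) i 0),
                            Tok.op (PySem.List.pyGetD (c0 :: cs) (i - 1) "")])
      [Tok.num (PySem.List.pyGetD (p0 :: p1 :: ps) 0 0),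
       Tok.num (PySem.List.pyGetD (p0 :: p1 :: ps) 1 0),
       Tok.op (PySem.List.pyGetD (c0 :: cs) 0 "")] =
      [Tok.num p0, Tok.num p1, Tok.op c0] ++ pairsToks (cs.zip ps) := by
    have h2 : (((p0 :: p1 :: ps).length : Nat) : Int) = ((2 : Nat) : Int) + ps.length := by
      simp only [List.length_cons]; push_cast; ring
    have hg0 : PySem.List.pyGetD (p0 :: p1 :: ps) 0 0 = p0 := PySem.List.pyGetD_zero_cons ..
    have hg1 : PySem.List.pyGetD (p0 :: p1 :: ps) 1 0 = p1 := by
      have : (1 : Int) = ((1 : Nat) : Int) := rfl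
      rw [this, PySem.List.pyGetD_natCast]; rfl
    have hgc0 : PySem.List.pyGetD (c0 :: cs) 0 "" = c0 := PySem.List.pyGetD_zero_cons ..
    rw [hg0, hg1, hgc0, h2]
    have h2' : (2 : Int) = ((2 : Nat) : Int) := rfl
    rw [h2']
    exact rpn_build ps cs 2 (p0 :: p1 :: ps) (c0 :: cs) _ (by omega) rfl rfl hcl
  have htoks : [Tok.num p0, Tok.num p1, Tok.op c0] ++ pairsToks (cs.zip ps) =
      Tok.num p0 :: pairsToks ((c0 :: cs).zip (p1 :: ps)) := by
    simp [pairsToks]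
  simp only [tryComboA, finishA, hrpn, htoks, evaluate_rpn, rpn_to_infix, evalGo, infixGo,
    evalGo_pairs, infixGo_pairs]

theorem foldStop_singleton {α σ : Type} (f : σ → α → σ × Bool) (s : σ) (a : α) :
    foldStop f s [a] = f s a := by
  simp only [foldStop]
  rcases f s a with ⟨s', d⟩
  cases d <;> rfl

theorem extendB_eq (target max_solutions : Int) (rest : List Int) (val : Int) (expr : String)
    (sols : List String) :
    foldStop (fun s combo => finishA target max_solutions s (evalSteps val (combo.zip rest))
        (strSteps expr (combo.zip rest))) sols (pyProd rest.length) =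
      extendB target max_solutions rest val expr sols := by
  induction rest generalizing val expr sols with
  | nil =>
    rw [show (List.length ([] : List Int)) = 0 from rfl]
    unfold pyProd
    rw [foldStop_singleton]
    simp only [List.zip_nil_right, evalSteps, strSteps, finishA, extendB]
    by_cases hv : val = target <;> by_cases hm : expr ∈ sols <;>
      simp [hv, hm]
  | cons b tail ih =>
    rw [show (b :: tail).length = tail.length + 1 from rfl]
    unfold pyProd
    rw [foldStop_flatMap]
    show _ = extendB target max_solutions (b :: tail) val expr sols
    unfold extendB
    apply foldStop_congr
    intro s o ho
    rw [foldStop_map]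
    fin_cases ho
    · -- "+"
      simp only [stepB, String.reduceEq, reduceIte, List.zip_cons_cons, evalSteps, strSteps]
      exact ih _ _ _
    · -- "-"
      simp only [stepB, String.reduceEq, reduceIte, List.zip_cons_cons, evalSteps, strSteps]
      by_cases hsub : val - b ≤ 0
      · simp only [if_pos hsub, if_neg (show ¬ val - b > 0 by omega)]
        exact foldStop_none _ fun s' c _ => by simp [finishA]
      · simp only [if_neg hsub, if_pos (show val - b > 0 by omega)]
        exact ih _ _ _
    · -- "*"
      simp only [stepB, String.reduceEq, reduceIte, List.zip_cons_cons, evalSteps, strSteps]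
      exact ih _ _ _
    · -- "/"
      simp only [stepB, String.reduceEq, reduceIte, List.zip_cons_cons, evalSteps, strSteps]
      by_cases hdiv : b = 0 ∨ PySem.Int.mod val b ≠ 0
      · simp only [if_pos hdiv, if_neg (show ¬ (b ≠ 0 ∧ PySem.Int.mod val b = 0) by tauto)]
        exact foldStop_none _ fun s' c _ => by simp [finishA]
      · simp only [if_neg hdiv, if_pos (show b ≠ 0 ∧ PySem.Int.mod val b = 0 by tauto)]
        exact ih _ _ _

-- ===== VERDICT (by name: the statement is the Claim_ definition above) =====
theorem solve_countdown_spec : Claim_equal_solve_countdown := by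
  intro numbers target max_solutions _
  unfold Spec_solve_countdown solve_countdown solve_countdown_alt
  congr 1
  apply foldStop_congr
  intro sols r hr
  have hr2 : 2 ≤ r := (PySem.List.mem_pyRange_one.mp hr).1
  apply foldStop_congr
  intro sols' perm hperm
  have hlen : perm.length = r.toNat := PySem.List.length_of_mem_permutations hperm
  rcases perm with _ | ⟨p0, rest⟩
  · simp at hlen; omega
  rcases rest with _ | ⟨p1, ps⟩
  · simp at hlen; omega
  have hrlen : r = (((p0 :: p1 :: ps).length : Nat) : Int) := by
    simp only [hlen]; omega
  calc foldStop (fun sols combo => tryComboA target max_solutions r (p0 :: p1 :: ps) sols combo)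
        sols' (pyProd (r.toNat - 1))
      = foldStop (fun s combo => finishA target max_solutions s
          (evalSteps p0 (combo.zip (p1 :: ps)))
          (strSteps (PySem.Int.toStr p0) (combo.zip (p1 :: ps))))
          sols' (pyProd (p1 :: ps).length) := by
        rw [show r.toNat - 1 = (p1 :: ps).length by simp at hlen ⊢; omega]
        apply foldStop_congr
        intro s combo hcombo
        rw [hrlen]
        exact tryComboA_eq target max_solutions p0 p1 ps combo s
          (by simpa using pyProd_length hcombo)
    _ = extendB target max_solutions (p1 :: ps) p0 (PySem.Int.toStr p0) sols' :=
        extendB_eq ..
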